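-- pv_equiv track=rewrite | github.com/Sergei137/Mealy-FSM-mod3 | mealy_fsm_mod3.py | mealy_fsm_mod3
-- ===== SOURCE A (Python) =====
-- def mealy_fsm_mod3(bin_val):
--     state = 0
--     for i in bin_val:
--         if state == 0:
--             if i == 0:
--                 state = 0
--             elif i == 1:
--                 state = 1
--         elif state == 1:
--             if i == 0:
--                 state = 2
--             elif i == 1:
--                 state = 0
--         elif state == 2:
--             if i == 0:
--                 state = 1
--             elif i == 1:
--                 state = 2
--     return state
-- ===== SOURCE B (Python) =====
-- def mealy_fsm_mod3(bin_val):
--     # Build the whole binary number from the valid bits, then take mod 3 once.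
--     # A non-bit element leaves the number unchanged, matching A's fall-through.
--     value = 0
--     for b in bin_val:
--         if b in (0, 1):
--             value = 2 * value + b
--     return value % 3
-- ===== Notes on version B (the rewrite author's own statement) =====
-- stated objective: alternative
-- what changed: Instead of stepping a 3-state Mealy machine with a per-state case analysis, B accumulates the actual binary number represented by the valid bits (value = 2*value + b) and takes a single mod 3 at the end; correctness rests on (2v+b) mod 3 reproducing A's transition table.
import Mathlib
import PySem

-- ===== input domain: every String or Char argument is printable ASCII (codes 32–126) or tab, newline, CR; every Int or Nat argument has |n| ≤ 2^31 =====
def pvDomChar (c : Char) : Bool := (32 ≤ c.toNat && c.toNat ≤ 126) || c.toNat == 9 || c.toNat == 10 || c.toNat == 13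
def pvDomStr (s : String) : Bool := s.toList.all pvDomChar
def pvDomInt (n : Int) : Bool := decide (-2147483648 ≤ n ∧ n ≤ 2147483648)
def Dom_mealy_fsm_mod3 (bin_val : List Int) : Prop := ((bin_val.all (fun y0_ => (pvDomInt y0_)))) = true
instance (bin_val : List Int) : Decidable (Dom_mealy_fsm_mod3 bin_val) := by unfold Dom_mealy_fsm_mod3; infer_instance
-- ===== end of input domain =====

-- B accumulates the binary number of the valid bits and takes one mod 3 at the end,
-- instead of stepping A's 3-state case-analysis machine (objective: alternative).

-- ===== PORT A =====
-- one step of A's nested if/elif chain (branches in source order; fall-through keeps state)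
def pvStepA (state : Int) (i : Int) : Int :=
  if state = 0 then
    (if i = 0 then 0 else if i = 1 then 1 else state)
  else if state = 1 then
    (if i = 0 then 2 else if i = 1 then 0 else state)
  else if state = 2 then
    (if i = 0 then 1 else if i = 1 then 2 else state)
  else state

def mealy_fsm_mod3 (bin_val : List Int) : Int :=
  bin_val.foldl pvStepA 0

-- ===== PORT B =====
def mealy_fsm_mod3_alt (bin_val : List Int) : Int :=
  PySem.Int.mod
    (bin_val.foldl (fun value b => if b = 0 ∨ b = 1 then 2 * value + b else value) 0) 3

-- ===== PRECONDITION & SPEC =====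
def Spec_mealy_fsm_mod3 (bin_val : List Int) (out : Int) : Prop := out = mealy_fsm_mod3_alt bin_val
instance (bin_val : List Int) (out : Int) : Decidable (Spec_mealy_fsm_mod3 bin_val out) := by unfold Spec_mealy_fsm_mod3; infer_instance

-- ===== CLAIM (what is proved, stated in full; the proofs are below) =====
def Claim_equal_mealy_fsm_mod3 : Prop := ∀ (bin_val : List Int), Dom_mealy_fsm_mod3 bin_val → Spec_mealy_fsm_mod3 bin_val (mealy_fsm_mod3 bin_val)

-- ===== LEMMAS AND PROOFS =====
-- A's transition table is exactly "double, add the bit, reduce mod 3" on the residue.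
theorem pvStepA_emod (v i : Int) :
    pvStepA (v % 3) i = (if i = 0 ∨ i = 1 then 2 * v + i else v) % 3 := by
  have h3 : (0:Int) < 3 := by norm_num
  have hv : v % 3 = 0 ∨ v % 3 = 1 ∨ v % 3 = 2 := by omega
  unfold pvStepA
  by_cases hi0 : i = 0 <;> by_cases hi1 : i = 1 <;>
    rcases hv with h | h | h <;> simp_all <;> omega

theorem pvFoldl_emod (bin_val : List Int) (v : Int) :
    bin_val.foldl pvStepA (v % 3) =
    (bin_val.foldl (fun value b => if b = 0 ∨ b = 1 then 2 * value + b else value) v) % 3 := by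
  induction bin_val generalizing v with
  | nil => rfl
  | cons x xs ih =>
    simp only [List.foldl, pvStepA_emod]
    exact ih _

-- ===== VERDICT (by name: the statement is the Claim_ definition above) =====
theorem mealy_fsm_mod3_spec : Claim_equal_mealy_fsm_mod3 := by
  intro bin_val _
  unfold Spec_mealy_fsm_mod3 mealy_fsm_mod3 mealy_fsm_mod3_alt
  rw [PySem.Int.mod_eq_emod_of_pos (a := (bin_val.foldl (fun value b => if b = 0 ∨ b = 1 then 2 * value + b else value) 0)) (by norm_num)]
  have h := pvFoldl_emod bin_val 0
  norm_num at h
  exact h
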